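-- pv_equiv track=rewrite | github.com/Steve0465/godman-lab | build/lib/godman_ai/agents/reviewer.py | _get_recommended_actions
-- ===== SOURCE A (Python) =====
-- from typing import Dict, List
--
-- def _get_recommended_actions(issues: List[Dict]) -> List[str]:
--     """
--     Generate recommended actions based on issues found.
--
--     Args:
--         issues: List of detected issues
--
--     Returns:
--         List of recommended action strings
--     """
--     actions = []
--
--     issue_types = [issue["type"] for issue in issues]
--
--     if "error" in issue_types:
--         actions.append("Fix all errors before resubmitting")
--         actions.append("Check error logs for detailed information")
--
--     if "warning" in issue_types:
--         actions.append("Address warnings to improve quality")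
--
--     if "incomplete" in issue_types or "insufficient_output" in issue_types:
--         actions.append("Ensure all steps complete successfully")
--         actions.append("Verify output contains expected information")
--
--     if not actions:
--         actions.append("Review output and resubmit")
--
--     return actions
-- ===== SOURCE B (Python) =====
-- from typing import Dict, List
--
-- _E = ["Fix all errors before resubmitting", "Check error logs for detailed information"]
-- _W = ["Address warnings to improve quality"]
-- _I = ["Ensure all steps complete successfully", "Verify output contains expected information"]
--
-- _TYPE_BIT = {"error": 1, "warning": 2, "incomplete": 4, "insufficient_output": 4}
--
-- # all 8 possible answers, precomputed once, indexed by the 3-bit mask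
-- _TABLE = [
--     ((_E if m & 1 else []) + (_W if m & 2 else []) + (_I if m & 4 else []))
--     or ["Review output and resubmit"]
--     for m in range(8)
-- ]
--
-- def _get_recommended_actions(issues: List[Dict]) -> List[str]:
--     mask = 0
--     for issue in issues:
--         mask |= _TYPE_BIT.get(issue["type"], 0)
--     return _TABLE[mask]
-- ===== Notes on version B (the rewrite author's own statement) =====
-- stated objective: alternative
-- what changed: Replaces A's list of issue types plus four membership-tested if-branches by a single fold that ORs each issue's type into a 3-bit mask and a precomputed 8-entry answer table indexed by that mask.
import Mathlib
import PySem

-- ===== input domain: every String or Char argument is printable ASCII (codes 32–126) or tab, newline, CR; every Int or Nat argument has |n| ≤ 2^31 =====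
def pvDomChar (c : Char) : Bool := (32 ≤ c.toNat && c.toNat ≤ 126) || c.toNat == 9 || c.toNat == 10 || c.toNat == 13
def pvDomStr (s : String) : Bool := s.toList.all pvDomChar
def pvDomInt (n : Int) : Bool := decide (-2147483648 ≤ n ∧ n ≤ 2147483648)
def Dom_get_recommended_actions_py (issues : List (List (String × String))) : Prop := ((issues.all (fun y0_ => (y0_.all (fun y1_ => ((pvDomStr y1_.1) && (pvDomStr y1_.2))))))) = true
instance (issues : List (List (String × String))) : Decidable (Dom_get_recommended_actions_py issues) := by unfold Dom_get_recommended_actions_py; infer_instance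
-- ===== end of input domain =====

-- B replaces A's issue-types list + four membership-tested if-branches by one fold
-- ORing each type's bit into a 3-bit mask and a precomputed 8-entry answer table
-- indexed by that mask ('alternative'); same return value on Pre_.
-- ===== PORT A =====
-- issue["type"] raises KeyError when the key is missing; Pre_ excludes that, so
-- under Pre_ the .getD "" default is never taken (exact there).
def get_recommended_actions_py (issues : List (List (String × String))) : List String :=
  let issue_types := issues.map (fun issue => (PySem.Dict.get? (PySem.Dict.mk issue) "type").getD "")
  let actions : List String := []
  let actions := if issue_types.contains "error"
    then actions ++ ["Fix all errors before resubmitting", "Check error logs for detailed information"]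
    else actions
  let actions := if issue_types.contains "warning"
    then actions ++ ["Address warnings to improve quality"]
    else actions
  let actions := if issue_types.contains "incomplete" || issue_types.contains "insufficient_output"
    then actions ++ ["Ensure all steps complete successfully", "Verify output contains expected information"]
    else actions
  if actions.isEmpty then ["Review output and resubmit"] else actions

-- ===== PORT B =====
def pvE : List String := ["Fix all errors before resubmitting", "Check error logs for detailed information"]
def pvW : List String := ["Address warnings to improve quality"]
def pvI : List String := ["Ensure all steps complete successfully", "Verify output contains expected information"]

def pvTypeBit : PySem.Dict String Nat :=
  PySem.Dict.mk [("error", 1), ("warning", 2), ("incomplete", 4), ("insufficient_output", 4)]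

-- the module-level table comprehension of Source B ('m & k' truthy = ≠ 0)
def pvTable : List (List String) :=
  (List.range 8).map (fun m =>
    let l := (if m &&& 1 ≠ 0 then pvE else []) ++ (if m &&& 2 ≠ 0 then pvW else [])
               ++ (if m &&& 4 ≠ 0 then pvI else [])
    if l.isEmpty then ["Review output and resubmit"] else l)

-- same note as port A: under Pre_ the .getD "" default is never taken (exact there);
-- TABLE[mask] with mask < 8 always in range, ported as getD.
def get_recommended_actions_py_alt (issues : List (List (String × String))) : List String :=
  let mask := issues.foldl
    (fun m issue =>
      m ||| PySem.Dict.getD pvTypeBit ((PySem.Dict.get? (PySem.Dict.mk issue) "type").getD "") 0) 0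
  pvTable.getD mask []

-- ===== PRECONDITION & SPEC =====
-- Pre_ excludes inputs where some issue dict has no "type" key: there Python A raises KeyError.
def Pre_get_recommended_actions_py (issues : List (List (String × String))) : Prop :=
  ∀ issue ∈ issues, (PySem.Dict.contains (PySem.Dict.mk issue) "type") = true
instance (issues : List (List (String × String))) : Decidable (Pre_get_recommended_actions_py issues) := by
  unfold Pre_get_recommended_actions_py; infer_instance
def pvWitness_get_recommended_actions_py : (List (List (String × String))) :=
  [[("type", "error")], [("type", "warning"), ("msg", "x")]]

def Spec_get_recommended_actions_py (issues : List (List (String × String))) (out : List String) : Prop := out = get_recommended_actions_py_alt issues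
instance (issues : List (List (String × String))) (out : List String) : Decidable (Spec_get_recommended_actions_py issues out) := by unfold Spec_get_recommended_actions_py; infer_instance

-- ===== CLAIM (what is proved, stated in full; the proofs are below) =====
def Claim_equal_get_recommended_actions_py : Prop := ∀ (issues : List (List (String × String))), Dom_get_recommended_actions_py issues → Pre_get_recommended_actions_py issues → Spec_get_recommended_actions_py issues (get_recommended_actions_py issues)

-- ===== LEMMAS AND PROOFS =====

-- the type string of one issue, as both ports compute it
def pvTy (issue : List (String × String)) : String :=
  (PySem.Dict.get? (PySem.Dict.mk issue) "type").getD ""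

-- bit contributed by one type string
def pvBit (t : String) : Nat := PySem.Dict.getD pvTypeBit t 0

-- the mask determined by the three membership facts
def pvToMask (e w i : Bool) : Nat :=
  (if e then 1 else 0) ||| (if w then 2 else 0) ||| (if i then 4 else 0)

lemma pvBit_or_toMask (t : String) (e w i : Bool) :
    pvBit t ||| pvToMask e w i
      = pvToMask (("error" == t) || e) (("warning" == t) || w)
          (("incomplete" == t) || ("insufficient_output" == t) || i) := by
  by_cases h1 : t = "error"
  · subst h1; cases e <;> cases w <;> cases i <;> rfl
  · by_cases h2 : t = "warning"
    · subst h2; cases e <;> cases w <;> cases i <;> rfl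
    · by_cases h3 : t = "incomplete"
      · subst h3; cases e <;> cases w <;> cases i <;> rfl
      · by_cases h4 : t = "insufficient_output"
        · subst h4; cases e <;> cases w <;> cases i <;> rfl
        · have e1 : ("error" == t) = false := by simp [Ne.symm h1]
          have e2 : ("warning" == t) = false := by simp [Ne.symm h2]
          have e3 : ("incomplete" == t) = false := by simp [Ne.symm h3]
          have e4 : ("insufficient_output" == t) = false := by simp [Ne.symm h4]
          have hb : pvBit t = 0 := by
            simp [pvBit, pvTypeBit, PySem.Dict.getD, PySem.Dict.get?, List.find?, e1, e2, e3, e4]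
          simp [hb, e1, e2, e3, e4]

-- the fold of B computes exactly the mask of the three membership facts of A
lemma pvFold_mask (issues : List (List (String × String))) (m : Nat) :
    issues.foldl
        (fun m issue =>
          m ||| PySem.Dict.getD pvTypeBit ((PySem.Dict.get? (PySem.Dict.mk issue) "type").getD "") 0) m
      = m ||| pvToMask ((issues.map pvTy).contains "error")
                ((issues.map pvTy).contains "warning")
                ((issues.map pvTy).contains "incomplete"
                  || (issues.map pvTy).contains "insufficient_output") := by
  induction issues generalizing m with
  | nil => simp [pvToMask]
  | cons x xs ih =>
    simp only [List.foldl_cons, List.map_cons, List.contains_cons]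
    have hb : PySem.Dict.getD pvTypeBit ((PySem.Dict.get? (PySem.Dict.mk x) "type").getD "") 0
        = pvBit (pvTy x) := rfl
    rw [hb, ih, Nat.or_assoc, pvBit_or_toMask]
    congr 1
    cases ("incomplete" == pvTy x) <;> cases ("insufficient_output" == pvTy x) <;>
      cases (List.contains (xs.map pvTy) "incomplete") <;>
      cases (List.contains (xs.map pvTy) "insufficient_output") <;> rfl

-- A's result as a function of the three membership facts
def pvBuild (e w i : Bool) : List String :=
  let l := (if e then pvE else []) ++ (if w then pvW else []) ++ (if i then pvI else [])
  if l.isEmpty then ["Review output and resubmit"] else l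

lemma pvTable_getD (e w i : Bool) :
    pvTable.getD (pvToMask e w i) [] = pvBuild e w i := by
  cases e <;> cases w <;> cases i <;> rfl

-- ===== VERDICT (by name: the statement is the Claim_ definition above) =====
theorem get_recommended_actions_py_spec : Claim_equal_get_recommended_actions_py := by
  intro issues _ _
  unfold Spec_get_recommended_actions_py
  simp only [get_recommended_actions_py, get_recommended_actions_py_alt]
  rw [pvFold_mask, Nat.zero_or, pvTable_getD]
  simp only [show (fun issue => (PySem.Dict.get? (PySem.Dict.mk issue) "type").getD "") = pvTy
    from rfl]
  cases hE : (List.map pvTy issues).contains "error" <;>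
    cases hW : (List.map pvTy issues).contains "warning" <;>
    cases hI1 : (List.map pvTy issues).contains "incomplete" <;>
    cases hI2 : (List.map pvTy issues).contains "insufficient_output" <;>
    simp [pvBuild, pvE, pvW, pvI]
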